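-- pv_equiv track=rewrite | github.com/dahuilangda/Boltz2Score | boltz2score.py | _resolve_model_ligand_chain_id
-- ===== SOURCE A (Python) =====
-- def _resolve_model_ligand_chain_id(
--     available_chain_ids: list[str],
--     requested_ligand_chain_id: str | None,
-- ) -> str:
--     if not available_chain_ids:
--         raise RuntimeError("No ligand chain found in output structure.")
--
--     if requested_ligand_chain_id:
--         requested = requested_ligand_chain_id.strip()
--         if requested:
--             requested_upper = requested.upper()
--             for chain_id in available_chain_ids:
--                 if chain_id.upper() == requested_upper:
--                     return chain_id
--             for chain_id in available_chain_ids: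
--                 chain_upper = chain_id.upper()
--                 if chain_upper.startswith(f"{requested_upper}X"):
--                     return chain_id
--                 if requested_upper.startswith(f"{chain_upper}X"):
--                     return chain_id
--
--     if len(available_chain_ids) == 1:
--         return available_chain_ids[0]
--
--     raise RuntimeError(
--         "Unable to resolve model ligand chain id uniquely. "
--         f"Available ligand chains: {available_chain_ids}. "
--         f"Requested chain: {requested_ligand_chain_id!r}."
--     )
-- ===== SOURCE B (Python) =====
-- def _resolve_model_ligand_chain_id(
--     available_chain_ids: list[str],
--     requested_ligand_chain_id: str | None,
-- ) -> str:
--     if not available_chain_ids: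
--         raise RuntimeError("No ligand chain found in output structure.")
--
--     requested = (requested_ligand_chain_id or "").strip()
--     if requested:
--         requested_upper = requested.upper()
--         candidates = []
--         for chain_id in available_chain_ids:
--             chain_upper = chain_id.upper()
--             if chain_upper == requested_upper:
--                 candidates.append((0, chain_id))
--             elif chain_upper.startswith(f"{requested_upper}X") or requested_upper.startswith(f"{chain_upper}X"):
--                 candidates.append((1, chain_id))
--         if candidates:
--             # min with key returns the FIRST candidate of minimal rank:
--             # the first exact match if any exists, else the first prefix match.
--             return min(candidates, key=lambda t: t[0])[1]
--
--     if len(available_chain_ids) == 1: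
--         return available_chain_ids[0]
--
--     raise RuntimeError(
--         "Unable to resolve model ligand chain id uniquely. "
--         f"Available ligand chains: {available_chain_ids}. "
--         f"Requested chain: {requested_ligand_chain_id!r}."
--     )
-- ===== Notes on version B (the rewrite author's own statement) =====
-- stated objective: alternative
-- what changed: Instead of A's two early-return scans, B builds a ranked candidate list (rank 0 for exact matches, rank 1 for prefix matches) in one filtering pass and then selects the first candidate of minimal rank with min(key=rank).
import Mathlib
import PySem

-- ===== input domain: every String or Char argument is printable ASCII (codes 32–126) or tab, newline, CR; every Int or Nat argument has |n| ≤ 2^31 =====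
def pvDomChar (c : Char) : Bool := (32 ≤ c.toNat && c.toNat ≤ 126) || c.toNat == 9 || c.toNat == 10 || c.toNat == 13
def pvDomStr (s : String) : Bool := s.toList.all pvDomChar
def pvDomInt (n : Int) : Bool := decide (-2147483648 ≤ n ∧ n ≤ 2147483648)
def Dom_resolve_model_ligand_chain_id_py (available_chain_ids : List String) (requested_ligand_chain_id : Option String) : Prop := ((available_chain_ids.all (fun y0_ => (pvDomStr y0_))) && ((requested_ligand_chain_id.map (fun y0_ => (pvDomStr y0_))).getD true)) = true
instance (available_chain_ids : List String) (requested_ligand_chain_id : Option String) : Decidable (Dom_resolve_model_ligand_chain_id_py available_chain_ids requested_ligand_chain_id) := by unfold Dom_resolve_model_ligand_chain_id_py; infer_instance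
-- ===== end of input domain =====

-- B replaces A's two early-return scans by one filtering pass building a ranked candidate
-- list (rank 0 = exact match, rank 1 = prefix match) followed by min(key=rank), which
-- returns the first candidate of minimal rank (objective: alternative decomposition).
-- Where the Python raises RuntimeError the ports return ""; those inputs are excluded by Pre_.

-- ===== PORT A =====
def resolve_model_ligand_chain_id_py (available_chain_ids : List String) (requested_ligand_chain_id : Option String) : String :=
  if available_chain_ids = [] then ""   -- Python: raise RuntimeError (excluded by Pre_)
  else
    let resolved : Option String :=
      match requested_ligand_chain_id with
      | none => none
      | some r =>
        if r = "" then none             -- falsy requested_ligand_chain_id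
        else
          let requested := PySem.Str.strip r
          if requested = "" then none
          else
            let requested_upper := PySem.Str.upper requested
            -- first loop: exact (case-insensitive) match, first hit returns
            match available_chain_ids.find? (fun chain_id => PySem.Str.upper chain_id == requested_upper) with
            | some c => some c
            | none =>
              -- second loop: bidirectional "...X" prefix test, first hit returns
              available_chain_ids.find? (fun chain_id =>
                PySem.Str.startswith (PySem.Str.upper chain_id) (requested_upper ++ "X")
                || PySem.Str.startswith requested_upper ((PySem.Str.upper chain_id) ++ "X"))
    match resolved with
    | some c => c
    | none =>
      if available_chain_ids.length = 1 then available_chain_ids.headD ""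
      else ""                           -- Python: raise RuntimeError (excluded by Pre_)

-- ===== PORT B =====
-- pvStep is the comparison step of Source B's min(candidates, key=rank): keep the first
-- candidate of minimal rank.
def pvStep (best t : Nat × String) : Nat × String := if t.1 < best.1 then t else best

def resolve_model_ligand_chain_id_py_alt (available_chain_ids : List String) (requested_ligand_chain_id : Option String) : String :=
  if available_chain_ids = [] then ""   -- Python: raise RuntimeError (excluded by Pre_)
  else
    let requested := PySem.Str.strip (requested_ligand_chain_id.getD "")
    let requested_upper := PySem.Str.upper requested
    -- one filtering pass: collect ranked candidates (rank 0 exact, rank 1 prefix)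
    let candidates : List (Nat × String) :=
      if requested = "" then []
      else available_chain_ids.filterMap (fun chain_id =>
        let chain_upper := PySem.Str.upper chain_id
        if chain_upper == requested_upper then some (0, chain_id)
        else if PySem.Str.startswith chain_upper (requested_upper ++ "X")
             || PySem.Str.startswith requested_upper (chain_upper ++ "X")
          then some (1, chain_id) else none)
    match candidates with
    | c :: rest =>
      -- min(candidates, key=rank): first candidate of minimal rank
      (rest.foldl pvStep c).2
    | [] =>
      if available_chain_ids.length = 1 then available_chain_ids.headD ""
      else ""                           -- Python: raise RuntimeError (excluded by Pre_)

-- ===== PRECONDITION & SPEC =====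
-- Pre_ excludes exactly the inputs on which the Python raises RuntimeError: the empty
-- chain list, and a multi-chain list whose resolution (exact or prefix match) fails.
def Pre_resolve_model_ligand_chain_id_py (available_chain_ids : List String) (requested_ligand_chain_id : Option String) : Prop :=
  available_chain_ids ≠ [] ∧
  (available_chain_ids.length = 1 ∨
    ∃ r, requested_ligand_chain_id = some r ∧ PySem.Str.strip r ≠ "" ∧
      ∃ c ∈ available_chain_ids,
        (PySem.Str.upper c = PySem.Str.upper (PySem.Str.strip r) ∨
         PySem.Str.startswith (PySem.Str.upper c) (PySem.Str.upper (PySem.Str.strip r) ++ "X") = true ∨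
         PySem.Str.startswith (PySem.Str.upper (PySem.Str.strip r)) (PySem.Str.upper c ++ "X") = true))
instance (available_chain_ids : List String) (requested_ligand_chain_id : Option String) : Decidable (Pre_resolve_model_ligand_chain_id_py available_chain_ids requested_ligand_chain_id) := by unfold Pre_resolve_model_ligand_chain_id_py; infer_instance

def pvWitness_resolve_model_ligand_chain_id_py : List String × Option String := (["A", "lig"], some "LIG")

def Spec_resolve_model_ligand_chain_id_py (available_chain_ids : List String) (requested_ligand_chain_id : Option String) (out : String) : Prop := out = resolve_model_ligand_chain_id_py_alt available_chain_ids requested_ligand_chain_id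
instance (available_chain_ids : List String) (requested_ligand_chain_id : Option String) (out : String) : Decidable (Spec_resolve_model_ligand_chain_id_py available_chain_ids requested_ligand_chain_id out) := by unfold Spec_resolve_model_ligand_chain_id_py; infer_instance

-- ===== CLAIM (what is proved, stated in full; the proofs are below) =====
def Claim_equal_resolve_model_ligand_chain_id_py : Prop := ∀ (available_chain_ids : List String) (requested_ligand_chain_id : Option String), Dom_resolve_model_ligand_chain_id_py available_chain_ids requested_ligand_chain_id → Pre_resolve_model_ligand_chain_id_py available_chain_ids requested_ligand_chain_id → Spec_resolve_model_ligand_chain_id_py available_chain_ids requested_ligand_chain_id (resolve_model_ligand_chain_id_py available_chain_ids requested_ligand_chain_id)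

-- ===== LEMMAS AND PROOFS =====

-- The candidate builder used by B, abstracted over the two predicates.
def pvCand (pe pp : String → Bool) (l : List String) : List (Nat × String) :=
  l.filterMap (fun c => if pe c then some (0, c) else if pp c then some (1, c) else none)

-- Folding min-by-rank over candidates (ranks are 0 or 1): a rank-0 accumulator is final;
-- a rank-1 accumulator is replaced by the first rank-0 candidate, i.e. the first pe-hit.
theorem fold_min_cand (pe pp : String → Bool) (l : List String) (b : Nat × String)
    (hb : b.1 = 0 ∨ b.1 = 1) :
    (pvCand pe pp l).foldl pvStep b
      = if b.1 = 0 then b else ((l.find? pe).map (fun c => ((0 : Nat), c))).getD b := by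
  induction l generalizing b with
  | nil => rcases hb with h | h <;> simp [pvCand, h]
  | cons x xs ih =>
    by_cases hpe : pe x
    · have hcons : pvCand pe pp (x :: xs) = ((0 : Nat), x) :: pvCand pe pp xs := by
        simp [pvCand, hpe]
      rcases hb with h | h
      · have hstep : pvStep b ((0 : Nat), x) = b := by simp [pvStep, h]
        rw [hcons, List.foldl_cons, hstep, ih b (Or.inl h)]
        simp [h]
      · have hstep : pvStep b ((0 : Nat), x) = ((0 : Nat), x) := by simp [pvStep, h]
        rw [hcons, List.foldl_cons, hstep, ih ((0 : Nat), x) (Or.inl rfl)]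
        simp [h, hpe]
    · by_cases hpp : pp x
      · have hcons : pvCand pe pp (x :: xs) = ((1 : Nat), x) :: pvCand pe pp xs := by
          simp [pvCand, hpe, hpp]
        have hstep : pvStep b ((1 : Nat), x) = b := by
          rcases hb with h | h <;> simp [pvStep, h]
        rw [hcons, List.foldl_cons, hstep, ih b hb]
        rcases hb with h | h
        · simp [h]
        · simp [h, hpe]
      · have hcons : pvCand pe pp (x :: xs) = pvCand pe pp xs := by
          simp [pvCand, hpe, hpp]
        rw [hcons, ih b hb]
        rcases hb with h | h
        · simp [h]
        · simp [h, hpe]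

-- B's candidate/min selection equals A's "first exact match, else first prefix match",
-- with a common fallback value fb for the no-candidate case.
theorem cand_min_full (pe pp : String → Bool) (l : List String) (fb : String) :
    (match pvCand pe pp l with
      | c :: rest => (rest.foldl pvStep c).2
      | [] => fb)
      = (match (l.find? pe).or (l.find? pp) with
          | some c => c
          | none => fb) := by
  induction l with
  | nil => simp [pvCand]
  | cons x xs ih =>
    by_cases hpe : pe x
    · have hcons : pvCand pe pp (x :: xs) = ((0 : Nat), x) :: pvCand pe pp xs := by
        simp [pvCand, hpe]
      rw [hcons]
      have := fold_min_cand pe pp xs ((0 : Nat), x) (Or.inl rfl)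
      simp only [this]
      simp [List.find?_cons, hpe, Option.or]
    · by_cases hpp : pp x
      · have hcons : pvCand pe pp (x :: xs) = ((1 : Nat), x) :: pvCand pe pp xs := by
          simp [pvCand, hpe, hpp]
        rw [hcons]
        have := fold_min_cand pe pp xs ((1 : Nat), x) (Or.inr rfl)
        simp only [this]
        simp only [List.find?_cons, hpe, hpp]
        cases h : xs.find? pe with
        | none => simp [Option.or]
        | some c => simp [Option.or]
      · have hcons : pvCand pe pp (x :: xs) = pvCand pe pp xs := by
          simp [pvCand, hpe, hpp]
        rw [hcons, ih]
        simp [hpe, hpp]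

theorem resolve_eq (available_chain_ids : List String) (requested_ligand_chain_id : Option String) :
    resolve_model_ligand_chain_id_py available_chain_ids requested_ligand_chain_id
      = resolve_model_ligand_chain_id_py_alt available_chain_ids requested_ligand_chain_id := by
  unfold resolve_model_ligand_chain_id_py resolve_model_ligand_chain_id_py_alt
  by_cases hnil : available_chain_ids = []
  · simp [hnil]
  · simp only [hnil, if_false]
    have h0 : PySem.Str.strip "" = "" := rfl
    cases requested_ligand_chain_id with
    | none => simp [h0]
    | some r =>
      by_cases hr : r = ""
      · simp [hr, h0]
      · by_cases hs : PySem.Str.strip r = ""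
        · simp [hr, hs]
        · simp only [hr, hs, Option.getD_some, if_false]
          -- A's staged "first exact, else first prefix" is Option.or of the two finds
          have hA : (match available_chain_ids.find?
                (fun chain_id => PySem.Str.upper chain_id == PySem.Str.upper (PySem.Str.strip r)) with
              | some c => some c
              | none =>
                available_chain_ids.find? (fun chain_id =>
                  PySem.Str.startswith (PySem.Str.upper chain_id) (PySem.Str.upper (PySem.Str.strip r) ++ "X")
                  || PySem.Str.startswith (PySem.Str.upper (PySem.Str.strip r)) ((PySem.Str.upper chain_id) ++ "X")))
              = (available_chain_ids.find?
                  (fun chain_id => PySem.Str.upper chain_id == PySem.Str.upper (PySem.Str.strip r))).or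
                (available_chain_ids.find? (fun chain_id =>
                  PySem.Str.startswith (PySem.Str.upper chain_id) (PySem.Str.upper (PySem.Str.strip r) ++ "X")
                  || PySem.Str.startswith (PySem.Str.upper (PySem.Str.strip r)) ((PySem.Str.upper chain_id) ++ "X"))) := by
            cases available_chain_ids.find?
                (fun chain_id => PySem.Str.upper chain_id == PySem.Str.upper (PySem.Str.strip r)) <;>
              simp [Option.or]
          rw [hA]
          exact (cand_min_full
            (fun chain_id => PySem.Str.upper chain_id == PySem.Str.upper (PySem.Str.strip r))
            (fun chain_id =>
              PySem.Str.startswith (PySem.Str.upper chain_id) (PySem.Str.upper (PySem.Str.strip r) ++ "X")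
              || PySem.Str.startswith (PySem.Str.upper (PySem.Str.strip r)) ((PySem.Str.upper chain_id) ++ "X"))
            available_chain_ids
            (if available_chain_ids.length = 1 then available_chain_ids.headD "" else "")).symm

-- ===== VERDICT (by name: the statement is the Claim_ definition above) =====
theorem resolve_model_ligand_chain_id_py_spec : Claim_equal_resolve_model_ligand_chain_id_py := by
  intro acs req _ _
  unfold Spec_resolve_model_ligand_chain_id_py
  exact resolve_eq acs req
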